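-- pv_equiv track=rewrite | github.com/Muhammad-Yunus/License-Plate-Recognition-OpenCV-Tesseract | main/app_ultrasonic.py | plate_transform
-- ===== SOURCE A (Python) =====
-- def plate_transform(plate_text):
--
--     plate_text = list(plate_text.strip())
--     original_letter =  ['i', 'I', 'O', 'Q', 'A', 'S', 'Z', 'z', 'o', 'G', 'B']
--     transform_letter = ['1', '1', '0', '0', '4', '5', '2', '2', '0', '6', '8']
--     if len(plate_text) > 5:
--         for i, letter in enumerate(original_letter) :
--             if letter in plate_text[2:-3] :
--                 plate_text[2:-3] = [item.replace(letter, transform_letter[i]) for item in plate_text[2:-3]]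
--     return ''.join(plate_text)
-- ===== SOURCE B (Python) =====
-- _TABLE = str.maketrans('iIOQASZzoGB', '11004522068')
--
-- def plate_transform(plate_text):
--     s = plate_text.strip()
--     if len(s) <= 5:
--         return s
--     return s[:2] + s[2:-3].translate(_TABLE) + s[-3:]
-- ===== Notes on version B (the rewrite author's own statement) =====
-- stated objective: faster
-- what changed: Replaces the loop over the 11 replacement letters (each doing a membership scan and a fresh slice rewrite of the middle) by one translation table built once and a single character pass over the middle slice via str.translate.
import Mathlib
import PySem

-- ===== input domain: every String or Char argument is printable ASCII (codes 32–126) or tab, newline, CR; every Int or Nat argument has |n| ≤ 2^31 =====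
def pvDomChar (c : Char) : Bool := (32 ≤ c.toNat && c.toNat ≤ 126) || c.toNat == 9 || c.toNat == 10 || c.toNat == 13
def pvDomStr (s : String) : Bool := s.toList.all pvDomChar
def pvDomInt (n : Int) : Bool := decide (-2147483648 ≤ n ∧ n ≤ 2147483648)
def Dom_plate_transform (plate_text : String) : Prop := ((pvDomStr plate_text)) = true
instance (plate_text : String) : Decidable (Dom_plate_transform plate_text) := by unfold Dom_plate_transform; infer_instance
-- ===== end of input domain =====

-- B replaces A's loop over the 11 replacement letters (membership test + fresh slice rewrite each)
-- by one translation table built once and a single character pass over the middle slice (idiomatic).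

-- ===== PORT A =====
-- the two parallel lists of A, zipped (enumerate pairs each letter with its digit)
def pvPairsA : List (Char × Char) :=
  [('i','1'),('I','1'),('O','0'),('Q','0'),('A','4'),('S','5'),('Z','2'),('z','2'),('o','0'),('G','6'),('B','8')]

-- one iteration of A's for-loop: membership test on the slice, then the slice assignment
-- (list[2:-3] = [...] is ported by hand as prefix slice ++ new middle ++ suffix slice; exact
-- because the assigned list has exactly the slice's length). item.replace(letter, t) on a
-- 1-character item is exactly 'if item == letter then t else item'.
def pvStepA (lst : List Char) (p : Char × Char) : List Char :=
  if p.1 ∈ PySem.List.slice lst (some 2) (some (-3)) then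
    PySem.List.slice lst none (some 2) ++
      (PySem.List.slice lst (some 2) (some (-3))).map (fun item => if item == p.1 then p.2 else item) ++
      PySem.List.slice lst (some (-3)) none
  else lst

def plate_transform (plate_text : String) : String :=
  let lst := PySem.Chars.strip plate_text.toList
  let lst := if lst.length > 5 then pvPairsA.foldl pvStepA lst else lst
  String.ofList lst

-- ===== PORT B =====
-- Source B's translation table: str.maketrans('iIOQASZzoGB', '11004522068'), as an association list
def pvTableB : List (Char × Char) := List.zip "iIOQASZzoGB".toList "11004522068".toList

-- one character under s.translate(table): looked up in the table, kept if unmapped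
def pvTranslateB (c : Char) : Char := ((pvTableB.lookup c).getD c)

def plate_transform_alt (plate_text : String) : String :=
  let s := PySem.Chars.strip plate_text.toList
  if s.length ≤ 5 then String.ofList s
  else String.ofList (PySem.List.slice s none (some 2) ++
                  (PySem.List.slice s (some 2) (some (-3))).map pvTranslateB ++
                  PySem.List.slice s (some (-3)) none)

-- ===== PRECONDITION & SPEC =====
def Spec_plate_transform (plate_text : String) (out : String) : Prop := out = plate_transform_alt plate_text
instance (plate_text : String) (out : String) : Decidable (Spec_plate_transform plate_text out) := by unfold Spec_plate_transform; infer_instance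

-- ===== CLAIM (what is proved, stated in full; the proofs are below) =====
def Claim_equal_plate_transform : Prop := ∀ (plate_text : String), Dom_plate_transform plate_text → Spec_plate_transform plate_text (plate_transform plate_text)

-- ===== LEMMAS AND PROOFS =====

-- the three slices of a ++ mid ++ b with |a| = 2, |b| = 3
lemma pv_slice_mid (a mid b : List Char) (ha : a.length = 2) (hb : b.length = 3) :
    PySem.List.slice (a ++ mid ++ b) (some 2) (some (-3)) = mid := by
  obtain ⟨x, y, rfl⟩ := List.length_eq_two.mp ha
  simp [PySem.List.slice, hb]

lemma pv_slice_pre (a mid b : List Char) (ha : a.length = 2) :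
    PySem.List.slice (a ++ mid ++ b) none (some 2) = a := by
  rw [show ((2:Int)) = ((2:Nat):Int) by norm_num, PySem.List.slice_to_natCast]
  simp [ha]

lemma pv_slice_suf (a mid b : List Char) (ha : a.length = 2) (hb : b.length = 3) :
    PySem.List.slice (a ++ mid ++ b) (some (-3)) none = b := by
  obtain ⟨x, y, rfl⟩ := List.length_eq_two.mp ha
  rw [PySem.List.slice_from_neg_ofNat _ 3 (by omega)]
  simp [hb]

-- one step of A's loop on a decomposed list
lemma pv_stepA_eq (a mid b : List Char) (ha : a.length = 2) (hb : b.length = 3) (p : Char × Char) :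
    pvStepA (a ++ mid ++ b) p = a ++ mid.map (fun c => if c == p.1 then p.2 else c) ++ b := by
  by_cases h : p.1 ∈ mid
  · rw [pvStepA, if_pos (by rw [pv_slice_mid a mid b ha hb]; exact h)]
    rw [pv_slice_mid a mid b ha hb, pv_slice_pre a mid b ha, pv_slice_suf a mid b ha hb]
  · rw [pvStepA, if_neg (by rw [pv_slice_mid a mid b ha hb]; exact h)]
    have hm := List.map_congr_left (l := mid) (f := fun c => if c == p.1 then p.2 else c)
      (g := id) (fun x hx => by
        have hne : ¬ x = p.1 := fun e => h (e ▸ hx)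
        simp [hne])
    rw [hm, List.map_id]

-- the whole loop of A is a single map over the middle
lemma pv_foldA_eq (ps : List (Char × Char)) (a b : List Char)
    (ha : a.length = 2) (hb : b.length = 3) :
    ∀ mid : List Char, ps.foldl pvStepA (a ++ mid ++ b) =
      a ++ mid.map (fun c => ps.foldl (fun acc p => if acc == p.1 then p.2 else acc) c) ++ b := by
  induction ps with
  | nil => intro mid; simp
  | cons p ps ih =>
    intro mid
    rw [List.foldl_cons, pv_stepA_eq a mid b ha hb p, ih (mid.map _), List.map_map]
    simp [Function.comp_def, List.foldl_cons]

-- sequential substitution by A's 11 pairs equals one table lookup of B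
lemma pv_char_eq (c : Char) :
    pvPairsA.foldl (fun acc p => if acc == p.1 then p.2 else acc) c = pvTranslateB c := by
  have ht : pvTableB = pvPairsA := by decide
  rw [pvTranslateB, ht]
  by_cases h1 : c = 'i'; · subst h1; decide
  by_cases h2 : c = 'I'; · subst h2; decide
  by_cases h3 : c = 'O'; · subst h3; decide
  by_cases h4 : c = 'Q'; · subst h4; decide
  by_cases h5 : c = 'A'; · subst h5; decide
  by_cases h6 : c = 'S'; · subst h6; decide
  by_cases h7 : c = 'Z'; · subst h7; decide
  by_cases h8 : c = 'z'; · subst h8; decide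
  by_cases h9 : c = 'o'; · subst h9; decide
  by_cases h10 : c = 'G'; · subst h10; decide
  by_cases h11 : c = 'B'; · subst h11; decide
  simp [pvPairsA, List.lookup, h1, h2, h3, h4, h5, h6, h7, h8, h9, h10, h11,
    beq_eq_false_iff_ne.mpr h1, beq_eq_false_iff_ne.mpr h2, beq_eq_false_iff_ne.mpr h3,
    beq_eq_false_iff_ne.mpr h4, beq_eq_false_iff_ne.mpr h5, beq_eq_false_iff_ne.mpr h6,
    beq_eq_false_iff_ne.mpr h7, beq_eq_false_iff_ne.mpr h8, beq_eq_false_iff_ne.mpr h9,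
    beq_eq_false_iff_ne.mpr h10, beq_eq_false_iff_ne.mpr h11]

theorem pv_main (plate_text : String) :
    plate_transform plate_text = plate_transform_alt plate_text := by
  simp only [plate_transform, plate_transform_alt]
  set s := PySem.Chars.strip plate_text.toList with hs
  by_cases h : s.length > 5
  · rw [if_pos h, if_neg (by omega)]
    have ha : (s.take 2).length = 2 := by simp; omega
    have hb : (s.drop (s.length - 3)).length = 3 := by simp; omega
    have h1 : s.take 2 ++ s.drop 2 = s := List.take_append_drop 2 s
    have h2 : (s.drop 2).take (s.length - 5) ++ (s.drop 2).drop (s.length - 5) = s.drop 2 :=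
      List.take_append_drop _ _
    have h3 : (s.drop 2).drop (s.length - 5) = s.drop (s.length - 3) := by
      rw [List.drop_drop]; congr 1; omega
    have hdec : s = s.take 2 ++ (s.drop 2).take (s.length - 5) ++ s.drop (s.length - 3) := by
      rw [List.append_assoc, ← h3, h2, h1]
    apply congrArg
    conv_lhs => rw [hdec]
    conv_rhs => rw [hdec]
    rw [pv_foldA_eq pvPairsA _ _ ha hb,
        pv_slice_pre _ _ _ ha, pv_slice_mid _ _ _ ha hb, pv_slice_suf _ _ _ ha hb]
    exact congrArg (fun m => s.take 2 ++ m ++ s.drop (s.length - 3))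
      (List.map_congr_left (fun c _ => pv_char_eq c))
  · rw [if_neg h, if_pos (by omega)]

-- ===== VERDICT (by name: the statement is the Claim_ definition above) =====
theorem plate_transform_spec : Claim_equal_plate_transform := by
  intro p _
  exact pv_main p
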